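-- pv_equiv track=rewrite | github.com/slackerscpt/2020-Advent-of-code | Day16/day16.py | validNumbers
-- ===== SOURCE A (Python) =====
-- def validNumbers(invalidList):
--     validPositions = []
--     counter = 0
--     while counter < 20:
--         if counter not in invalidList:
--             validPositions.append(counter)
--         counter += 1
--
--     return validPositions
-- ===== SOURCE B (Python) =====
-- def validNumbers(invalidList):
--     return sorted(set(range(20)) - set(invalidList))
-- ===== Notes on version B (the rewrite author's own statement) =====
-- stated objective: idiomatic
-- what changed: Replaces the explicit while-loop with a per-candidate linear membership scan by a whole-set difference set(range(20)) - set(invalidList) followed by a sort.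
import Mathlib
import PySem

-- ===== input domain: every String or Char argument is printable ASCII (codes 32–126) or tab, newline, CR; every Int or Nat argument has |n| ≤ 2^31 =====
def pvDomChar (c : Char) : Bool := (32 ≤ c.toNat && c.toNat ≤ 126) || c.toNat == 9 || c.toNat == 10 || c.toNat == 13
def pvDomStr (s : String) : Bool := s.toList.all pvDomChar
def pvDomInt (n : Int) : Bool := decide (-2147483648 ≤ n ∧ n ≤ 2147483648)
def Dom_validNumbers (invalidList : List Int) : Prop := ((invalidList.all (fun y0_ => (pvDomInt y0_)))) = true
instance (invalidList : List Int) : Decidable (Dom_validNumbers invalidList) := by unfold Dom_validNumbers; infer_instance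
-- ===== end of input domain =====

-- B replaces A's explicit counting loop with a whole-set difference plus sort (idiomatic; return value only).

-- ===== PORT A =====
-- the while loop: counter counts up from 0 to 19, appending counters not in invalidList
def validNumbersLoop (invalidList : List Int) (counter : Int) (validPositions : List Int) : List Int :=
  if _h : counter < 20 then
    validNumbersLoop invalidList (counter + 1)
      (if counter ∈ invalidList then validPositions else validPositions ++ [counter])
  else validPositions
termination_by (20 - counter).toNat
decreasing_by omega

def validNumbers (invalidList : List Int) : List Int :=
  validNumbersLoop invalidList 0 []

-- ===== PORT B =====
def validNumbers_alt (invalidList : List Int) : List Int :=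
  PySem.List.sorted
    (PySem.Set.diff (PySem.Set.ofList (PySem.List.pyRange 0 20 1)) (PySem.Set.ofList invalidList))
    (fun x => x) false

-- ===== PRECONDITION & SPEC =====
def Spec_validNumbers (invalidList : List Int) (out : List Int) : Prop := out = validNumbers_alt invalidList
instance (invalidList : List Int) (out : List Int) : Decidable (Spec_validNumbers invalidList out) := by unfold Spec_validNumbers; infer_instance

-- ===== CLAIM (what is proved, stated in full; the proofs are below) =====
def Claim_equal_validNumbers : Prop := ∀ (invalidList : List Int), Dom_validNumbers invalidList → Spec_validNumbers invalidList (validNumbers invalidList)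

-- ===== LEMMAS AND PROOFS =====

-- the common normal form: the range filtered by non-membership
theorem validNumbersLoop_eq (invalidList : List Int) (counter : Int) (acc : List Int) :
    validNumbersLoop invalidList counter acc
      = acc ++ (PySem.List.pyRange counter 20 1).filter (fun x => decide (x ∉ invalidList)) := by
  by_cases h : counter < 20
  · rw [validNumbersLoop, dif_pos h, validNumbersLoop_eq,
      PySem.List.pyRange_one_cons h, List.filter_cons]
    by_cases hm : counter ∈ invalidList <;> simp [hm]
  · rw [validNumbersLoop, dif_neg h, PySem.List.pyRange_one_eq_nil (by omega)]
    simp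
termination_by (20 - counter).toNat
decreasing_by omega

theorem validNumbers_alt_eq (invalidList : List Int) :
    validNumbers_alt invalidList
      = (PySem.List.pyRange 0 20 1).filter (fun x => decide (x ∉ invalidList)) := by
  unfold validNumbers_alt
  have hof : PySem.Set.ofList (PySem.List.pyRange 0 20 1) = PySem.List.pyRange 0 20 1 :=
    PySem.Set.ofList_eq_self_of_nodup _ (PySem.List.nodup_pyRange_one 0 20)
  rw [hof]
  have hdiff : PySem.Set.diff (PySem.List.pyRange 0 20 1) (PySem.Set.ofList invalidList)
      = (PySem.List.pyRange 0 20 1).filter (fun x => decide (x ∉ invalidList)) := by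
    simp [PySem.Set.diff, PySem.Set.mem_ofList]
  rw [hdiff]
  apply PySem.List.sorted_eq_self_of_pairwise
  exact ((PySem.List.pairwise_lt_pyRange_one 0 20).sublist List.filter_sublist).imp le_of_lt

-- ===== VERDICT (by name: the statement is the Claim_ definition above) =====
theorem validNumbers_spec : Claim_equal_validNumbers := by
  intro invalidList _
  unfold Spec_validNumbers validNumbers
  rw [validNumbersLoop_eq, validNumbers_alt_eq]
  simp
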